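-- pv_equiv track=rewrite | github.com/voting-tools/pref_voting | pref_voting/variable_voter_axioms.py | _submultisets_of_fixed_cardinality
-- ===== SOURCE A (Python) =====
-- from itertools import product, combinations, permutations
--
-- def _submultisets_of_fixed_cardinality(elements, multiplicities, cardinality):
--
--     # Yields all sub-multisets of the given multiset with fixed cardinality.
--     # For a closed-form expression for the number of sub-multisets of fixed cardinality, see https://arxiv.org/abs/1511.06142
--
--     def valid_partitions(cardinality, remaining_elements):
--         if cardinality == 0:
--             yield ()
--             return
--         if not remaining_elements:
--             return
--         first, *rest = remaining_elements
--         first_idx = elements.index(first)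
--         max_count = min(cardinality, multiplicities[first_idx])
--         for i in range(1, max_count + 1):
--             for partition in valid_partitions(cardinality-i, rest):
--                 yield (i,) + partition
--
--     for i in range(1, min(len(elements), cardinality) + 1):
--         for subset in combinations(elements, i):
--             for partition in valid_partitions(cardinality, subset):
--                 if len(partition) == len(subset):
--                     yield (subset, partition)
-- ===== SOURCE B (Python) =====
-- from itertools import combinations
--
-- def _submultisets_of_fixed_cardinality(elements, multiplicities, cardinality):
--     # Multiplicity of each element, first occurrence wins (as elements.index would find it).
--     mult = {}
--     for e, m in zip(elements, multiplicities):
--         if e not in mult: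
--             mult[e] = m
--
--     def compositions(total, caps):
--         # All tuples of parts with 1 <= part[i] <= caps[i] summing exactly to total,
--         # pruned so every branch explored can still be completed.
--         if not caps:
--             if total == 0:
--                 yield ()
--             return
--         first, *rest = caps
--         hi = min(total - len(rest), first)
--         for i in range(1, hi + 1):
--             for tail in compositions(total - i, rest):
--                 yield (i,) + tail
--
--     for k in range(1, min(len(elements), cardinality) + 1):
--         for subset in combinations(elements, k):
--             caps = [mult[e] for e in subset]
--             for comp in compositions(cardinality, caps):
--                 yield (subset, comp)
-- ===== Notes on version B (the rewrite author's own statement) =====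
-- stated objective: alternative
-- what changed: B precomputes a first-occurrence element-to-multiplicity dict instead of calling elements.index at every search node, and enumerates only exact compositions that use every subset element (pruning branches whose remaining total cannot fill the remaining positions), so A's generate-then-filter of short partitions disappears; the output itself is exponential, so overall cost is dominated by it.
import Mathlib
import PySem

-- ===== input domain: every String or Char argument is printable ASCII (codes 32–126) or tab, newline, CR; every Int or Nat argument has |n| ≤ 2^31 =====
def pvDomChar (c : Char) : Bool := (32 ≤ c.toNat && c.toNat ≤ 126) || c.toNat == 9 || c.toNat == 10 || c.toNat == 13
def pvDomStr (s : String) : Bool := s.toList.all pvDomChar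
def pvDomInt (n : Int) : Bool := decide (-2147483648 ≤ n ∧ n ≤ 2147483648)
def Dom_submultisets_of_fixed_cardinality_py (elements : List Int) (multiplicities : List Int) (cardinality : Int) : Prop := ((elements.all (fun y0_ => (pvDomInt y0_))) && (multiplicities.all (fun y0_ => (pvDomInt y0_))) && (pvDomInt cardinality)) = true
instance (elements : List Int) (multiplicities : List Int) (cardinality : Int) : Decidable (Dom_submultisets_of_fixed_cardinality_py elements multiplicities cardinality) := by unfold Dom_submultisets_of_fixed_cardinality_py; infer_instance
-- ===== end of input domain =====

-- B replaces A's per-node `elements.index` lookup and generate-then-filter partition search by a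
-- precomputed first-occurrence multiplicity dict and a pruned exact-composition enumeration
-- (an alternative decomposition; the overall cost is dominated by the exponential output).

-- ===== PORT A =====
-- inner generator valid_partitions of A (elements/multiplicities are the closed-over arguments)
def pvValidPartsA (es ms : List Int) (card : Int) (remaining : List Int) : List (List Int) :=
  if card == 0 then [[]]
  else
    match remaining with
    | [] => []
    | first :: rest =>
      match PySem.List.index? es first with
      | none => []        -- Python: ValueError from elements.index (unreachable: subsets come from elements)
      | some idx =>
        match PySem.List.pyGet? ms (idx : Int) with
        | none => []      -- Python: IndexError on multiplicities[first_idx]; excluded by Pre_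
        | some m =>
          (PySem.List.pyRange 1 (min card m + 1) 1).flatMap
            (fun i => (pvValidPartsA es ms (card - i) rest).map (fun p => i :: p))
termination_by remaining.length

def submultisets_of_fixed_cardinality_py (elements : List Int) (multiplicities : List Int) (cardinality : Int) : List (List Int × List Int) :=
  (PySem.List.pyRange 1 (min (elements.length : Int) cardinality + 1) 1).flatMap (fun i =>
    (PySem.List.combinations elements i.toNat).flatMap (fun subset =>
      (pvValidPartsA elements multiplicities cardinality subset).filterMap (fun p =>
        if p.length == subset.length then some (subset, p) else none)))

-- ===== PORT B =====
-- the first-occurrence-wins multiplicity dict of Source B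
def pvBuildMult (pairs : List (Int × Int)) (d : PySem.Dict Int Int) : PySem.Dict Int Int :=
  match pairs with
  | [] => d
  | (e, m) :: rest => pvBuildMult rest (if d.contains e then d else d.insert e m)

-- compositions(total, caps) of Source B: positive parts, part i ≤ caps i, summing exactly to total
def pvComps (total : Int) (caps : List Int) : List (List Int) :=
  match caps with
  | [] => if total == 0 then [[]] else []
  | first :: rest =>
    (PySem.List.pyRange 1 (min (total - (rest.length : Int)) first + 1) 1).flatMap
      (fun i => (pvComps (total - i) rest).map (fun t => i :: t))

def submultisets_of_fixed_cardinality_py_alt (elements : List Int) (multiplicities : List Int) (cardinality : Int) : List (List Int × List Int) :=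
  let d := pvBuildMult (elements.zip multiplicities) PySem.Dict.empty
  (PySem.List.pyRange 1 (min (elements.length : Int) cardinality + 1) 1).flatMap (fun k =>
    (PySem.List.combinations elements k.toNat).flatMap (fun subset =>
      -- mult[e]: getD 0 stands for a lookup that Python would raise KeyError on; excluded by Pre_
      (pvComps cardinality (subset.map (fun e => (d.get? e).getD 0))).map (fun c => (subset, c))))

-- ===== PRECONDITION & SPEC =====
-- A raises IndexError when some needed element's first-occurrence index reaches beyond
-- multiplicities; equivalently (for cardinality ≥ 1): some element of elements.drop ms.length
-- does not already occur in elements.take ms.length.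
def Pre_submultisets_of_fixed_cardinality_py (elements : List Int) (multiplicities : List Int) (cardinality : Int) : Prop :=
  cardinality ≤ 0 ∨ ∀ e ∈ elements.drop multiplicities.length, e ∈ elements.take multiplicities.length
instance (elements : List Int) (multiplicities : List Int) (cardinality : Int) : Decidable (Pre_submultisets_of_fixed_cardinality_py elements multiplicities cardinality) := by unfold Pre_submultisets_of_fixed_cardinality_py; infer_instance

def pvWitness_submultisets_of_fixed_cardinality_py : List Int × List Int × Int := ([1, 2], [2, 1], 2)

def Spec_submultisets_of_fixed_cardinality_py (elements : List Int) (multiplicities : List Int) (cardinality : Int) (out : List (List Int × List Int)) : Prop := out = submultisets_of_fixed_cardinality_py_alt elements multiplicities cardinality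
instance (elements : List Int) (multiplicities : List Int) (cardinality : Int) (out : List (List Int × List Int)) : Decidable (Spec_submultisets_of_fixed_cardinality_py elements multiplicities cardinality out) := by unfold Spec_submultisets_of_fixed_cardinality_py; infer_instance

-- ===== CLAIM (what is proved, stated in full; the proofs are below) =====
def Claim_equal_submultisets_of_fixed_cardinality_py : Prop := ∀ (elements : List Int) (multiplicities : List Int) (cardinality : Int), Dom_submultisets_of_fixed_cardinality_py elements multiplicities cardinality → Pre_submultisets_of_fixed_cardinality_py elements multiplicities cardinality → Spec_submultisets_of_fixed_cardinality_py elements multiplicities cardinality (submultisets_of_fixed_cardinality_py elements multiplicities cardinality)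

-- ===== LEMMAS AND PROOFS =====

theorem pv_witness_ok :
    Dom_submultisets_of_fixed_cardinality_py (pvWitness_submultisets_of_fixed_cardinality_py.1) (pvWitness_submultisets_of_fixed_cardinality_py.2.1) (pvWitness_submultisets_of_fixed_cardinality_py.2.2) ∧
    Pre_submultisets_of_fixed_cardinality_py (pvWitness_submultisets_of_fixed_cardinality_py.1) (pvWitness_submultisets_of_fixed_cardinality_py.2.1) (pvWitness_submultisets_of_fixed_cardinality_py.2.2) := by
  decide

-- the dict built by pvBuildMult answers like a first-match association-list lookup
theorem pvBuildMult_get? (pairs : List (Int × Int)) (d : PySem.Dict Int Int) (e : Int) :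
    (pvBuildMult pairs d).get? e = (d.get? e).or (pairs.lookup e) := by
  induction pairs generalizing d with
  | nil => simp [pvBuildMult]
  | cons p rest ih =>
    obtain ⟨k, v⟩ := p
    by_cases hk : d.contains k
    · rw [pvBuildMult, if_pos hk, ih]
      by_cases hek : e = k
      · subst hek
        have : (d.get? e).isSome := by rw [← PySem.Dict.contains_eq_isSome_get?]; exact hk
        obtain ⟨w, hw⟩ := Option.isSome_iff_exists.mp this
        simp [hw, List.lookup]
      · simp [List.lookup, beq_eq_false_iff_ne.mpr hek]
    · rw [pvBuildMult, if_neg hk, ih]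
      have hnone : d.get? k = none := by
        cases h : d.get? k with
        | none => rfl
        | some w => exact absurd (by rw [PySem.Dict.contains_eq_isSome_get?, h]; rfl) hk
      rw [PySem.Dict.get?_insert d k e v]
      by_cases hek : e = k
      · subst hek
        simp [hnone, List.lookup]
      · rw [if_neg hek]
        simp [List.lookup, beq_eq_false_iff_ne.mpr hek]

-- for an element whose first occurrence lies in the zipped prefix: A's index?/pyGet? pair
-- and B's zip lookup find the same multiplicity
theorem pv_lookup_key (es : List Int) :
    ∀ (ms : List Int) (e : Int), e ∈ es.take ms.length →
      ∃ (j : Nat) (v : Int), PySem.List.index? es e = some j ∧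
        PySem.List.pyGet? ms (j : Int) = some v ∧ (es.zip ms).lookup e = some v := by
  induction es with
  | nil => intro ms e h; simp at h
  | cons x xs ih =>
    intro ms e h
    cases ms with
    | nil => simp at h
    | cons m ms' =>
      simp only [List.length_cons, List.take_succ_cons, List.mem_cons] at h
      by_cases hx : x = e
      · subst hx
        refine ⟨0, m, ?_, ?_, ?_⟩
        · exact PySem.List.index?_cons_self x xs
        · rw [PySem.List.pyGet?_natCast]; rfl
        · simp [List.zip]
      · have he : e ∈ xs.take ms'.length := by
          rcases h with h | h
          · exact absurd h.symm hx
          · exact h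
        obtain ⟨j, v, hidx, hget, hlook⟩ := ih ms' e he
        refine ⟨j + 1, v, ?_, ?_, ?_⟩
        · rw [PySem.List.index?_cons_of_ne xs hx, hidx]; rfl
        · rw [show (((j + 1 : Nat)) : Int) = ((j:Int)+1) by push_cast; ring] at *
          rw [show ((j:Int)+1) = (((j+1:Nat)):Int) by push_cast; ring, PySem.List.pyGet?_natCast]
          rw [PySem.List.pyGet?_natCast] at hget
          simpa using hget
        · simpa [List.zip, List.lookup, (beq_iff_eq ..).ne.mpr (fun h' => hx h'.symm)] using hlook

-- a composition into more positive parts than the total allows is impossible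
theorem pvComps_eq_nil_of_lt (total : Int) (caps : List Int) (h : total < (caps.length : Int)) :
    pvComps total caps = [] := by
  cases caps with
  | nil =>
    have : total ≠ 0 := by simpa using h.ne
    simp [pvComps, this]
  | cons first rest =>
    have hb : min (total - (rest.length : Int)) first + 1 ≤ 1 := by
      simp only [List.length_cons] at h
      have : total - (rest.length : Int) ≤ 0 := by push_cast at h ⊢; omega
      omega
    simp [pvComps, PySem.List.pyRange_one_eq_nil hb]

theorem pv_flatMap_congr_mem {α β : Type} (l : List α) (f g : α → List β)
    (h : ∀ a ∈ l, f a = g a) : l.flatMap f = l.flatMap g := by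
  induction l with
  | nil => rfl
  | cons x xs ih =>
    simp only [List.flatMap_cons]
    rw [h x (by simp), ih (fun a ha => h a (by simp [ha]))]

-- keep-iff-length filterMap is map-after-filter
theorem pv_filterMap_if (xs : List (List Int)) (sub : List Int) :
    xs.filterMap (fun p => if p.length == sub.length then some (sub, p) else none)
      = (xs.filter (fun p => p.length == sub.length)).map (fun p => (sub, p)) := by
  induction xs with
  | nil => rfl
  | cons p xs ih =>
    simp only [List.filterMap_cons, List.filter_cons]
    cases h : (p.length == sub.length) <;>
      simp only [Bool.false_eq_true, if_false, if_true, List.map_cons, ih]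

-- drop the trailing, provably-empty tail of a 1-based range under a flatMap
theorem pv_flatMap_range_trim {α : Type} (f : Int → List α) :
    ∀ (n : Nat) (b b' : Int), (b - b').toNat = n → b' ≤ b →
      (∀ i, 1 ≤ i → b' < i → i ≤ b → f i = []) →
      (PySem.List.pyRange 1 (b + 1) 1).flatMap f = (PySem.List.pyRange 1 (b' + 1) 1).flatMap f := by
  intro n
  induction n with
  | zero =>
    intro b b' h0 hle _
    have : b = b' := by omega
    rw [this]
  | succ n ih =>
    intro b b' hn hle hf
    have hlt : b' < b := by omega
    by_cases hb : b ≤ 0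
    · rw [PySem.List.pyRange_one_eq_nil (show b + 1 ≤ 1 by omega),
          PySem.List.pyRange_one_eq_nil (show b' + 1 ≤ 1 by omega)]
    · have h1b : (1 : Int) ≤ b := by omega
      rw [PySem.List.pyRange_one_succ_right h1b, List.flatMap_append]
      simp only [List.flatMap_cons, List.flatMap_nil, List.append_nil]
      rw [hf b h1b hlt le_rfl, List.append_nil]
      have : b = (b - 1) + 1 := by ring
      rw [this]
      exact ih (b - 1) b' (by omega) (by omega) (fun i h1 h2 h3 => hf i h1 h2 (by omega))

-- the heart: A's length-filtered partitions are exactly B's pruned compositions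
theorem pv_parts_eq (es ms : List Int) (cap : Int → Int) :
    ∀ (sub : List Int) (c : Int),
      (∀ e ∈ sub, ∃ j : Nat, PySem.List.index? es e = some j ∧
          PySem.List.pyGet? ms (j : Int) = some (cap e)) →
      (pvValidPartsA es ms c sub).filter (fun p => p.length == sub.length)
        = pvComps c (sub.map cap) := by
  intro sub
  induction sub with
  | nil =>
    intro c _
    by_cases hc : c = 0 <;> simp [pvValidPartsA, pvComps, hc]
  | cons f rest ih =>
    intro c h
    obtain ⟨j, hidx, hget⟩ := h f (by simp)
    have hrest : ∀ e ∈ rest, ∃ j : Nat, PySem.List.index? es e = some j ∧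
        PySem.List.pyGet? ms (j : Int) = some (cap e) := fun e he => h e (by simp [he])
    by_cases hc : c = 0
    · subst hc
      have hlhs : pvValidPartsA es ms 0 (f :: rest) = [[]] := by rw [pvValidPartsA]; simp
      rw [hlhs]
      rw [pvComps_eq_nil_of_lt 0 ((f :: rest).map cap) (by simp)]
      simp
    · have hlhs : pvValidPartsA es ms c (f :: rest)
          = (PySem.List.pyRange 1 (min c (cap f) + 1) 1).flatMap
              (fun i => (pvValidPartsA es ms (c - i) rest).map (fun p => i :: p)) := by
        rw [pvValidPartsA, if_neg (show ¬ (c == 0) = true by simpa using hc), hidx]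
        simp only [hget]
      rw [hlhs]
      have hfil : ∀ (i : Int),
          ((pvValidPartsA es ms (c - i) rest).map (fun p => i :: p)).filter
              (fun p => p.length == (f :: rest).length)
            = (pvComps (c - i) (rest.map cap)).map (fun p => i :: p) := by
        intro i
        rw [List.filter_map]
        have hpred : ((fun p => p.length == (f :: rest).length) ∘ (fun p => i :: p))
            = (fun p : List Int => p.length == rest.length) := by
          funext p; simp
        rw [hpred, ih (c - i) hrest]
      rw [List.filter_flatMap]
      rw [pv_flatMap_congr_mem _ _ _ (fun i _ => hfil i)]
      have hrhs : pvComps c ((f :: rest).map cap)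
          = (PySem.List.pyRange 1 (min (c - (rest.length : Int)) (cap f) + 1) 1).flatMap
              (fun i => (pvComps (c - i) (rest.map cap)).map (fun p => i :: p)) := by
        rw [List.map_cons, pvComps, List.length_map]
      rw [hrhs]
      refine pv_flatMap_range_trim _ (min c (cap f) - min (c - (rest.length : Int)) (cap f)).toNat
        _ _ rfl (by omega) ?_
      intro i h1 h2 h3
      have : c - i < (rest.length : Int) := by
        rcases le_or_gt (c - (rest.length : Int)) (cap f) with hm | hm
        · rw [min_eq_left hm] at h2; omega
        · rw [min_eq_right hm.le] at h2
          have h4 : min c (cap f) ≤ cap f := min_le_right _ _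
          omega
      rw [pvComps_eq_nil_of_lt (c - i) (rest.map cap) (by simpa using this)]
      simp

-- ===== VERDICT (by name: the statement is the Claim_ definition above) =====
theorem submultisets_of_fixed_cardinality_py_spec : Claim_equal_submultisets_of_fixed_cardinality_py := by
  intro es ms c _ hpre
  unfold Spec_submultisets_of_fixed_cardinality_py
  unfold submultisets_of_fixed_cardinality_py submultisets_of_fixed_cardinality_py_alt
  rcases hpre with hc | hP
  · rw [PySem.List.pyRange_one_eq_nil (show min (es.length : Int) c + 1 ≤ 1 by omega)]
    simp
  · apply pv_flatMap_congr_mem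
    intro k _
    apply pv_flatMap_congr_mem
    intro sub hsub
    have hsubes : ∀ e ∈ sub, e ∈ es :=
      fun e he => (PySem.List.sublist_of_mem_combinations hsub).subset he
    have hcap : ∀ e ∈ sub, ∃ j : Nat, PySem.List.index? es e = some j ∧
        PySem.List.pyGet? ms (j : Int) =
          some (((pvBuildMult (es.zip ms) PySem.Dict.empty).get? e).getD 0) := by
      intro e he
      have hetake : e ∈ es.take ms.length := by
        have := hsubes e he
        rcases (List.mem_append.mp (by rw [List.take_append_drop ms.length es]; exact this)) with h | h
        · exact h
        · exact hP e h
      obtain ⟨j, v, hidx, hget, hlook⟩ := pv_lookup_key es ms e hetake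
      refine ⟨j, hidx, ?_⟩
      rw [pvBuildMult_get?, PySem.Dict.get?_empty, Option.none_or, hlook]
      exact hget
    rw [pv_filterMap_if, pv_parts_eq es ms _ sub c hcap]
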